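-- pv_equiv track=rewrite | github.com/KingICCrab/pim_mapper | validation/dram_v2/validate_input_real.py | count_row_activations
-- ===== SOURCE A (Python) =====
-- def count_row_activations(trace, dram_config):
--     """
--     Count row activations from a trace.
--     """
--     activations = {} # bank -> count
--     open_rows = {}   # bank -> row_idx
--
--     row_mask = (1 << 14) - 1 # 14 bits for row
--     # Address mapping (from trace_generator.py):
--     # col: 0-9 (10 bits)
--     # bank: 10-12 (3 bits) - Wait, trace_generator uses 4 banks (2 bits) or 8 banks?
--     # Let's check trace_generator.py _get_dram_addr
--     # It uses:
--     # col_bits = log2(row_size) = log2(1024) = 10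
--     # bank_bits = log2(num_banks) = log2(4) = 2
--     # rank_bits = log2(num_ranks) = 0
--     # channel_bits = log2(num_channels) = 0
--     #
--     # addr = row << (col + bank + rank + chan) | bank << ...
--     # So Row is at top.
--
--     # Let's assume standard mapping from trace_generator
--     # col: 0-9
--     # bank: 10-11
--     # row: 12+
--
--     for line in trace:
--         parts = line.strip().split()
--         if len(parts) < 2: continue
--
--         cmd = parts[0]
--         addr_str = parts[1]
--         try:
--             addr = int(addr_str, 16)
--         except ValueError:
--             continue
--
--         # Decode Address
--         # Assuming 1024 byte row buffer -> 10 bits col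
--         col_bits = 10
--         bank_bits = 2
--
--         bank = (addr >> col_bits) & ((1 << bank_bits) - 1)
--         row = (addr >> (col_bits + bank_bits))
--
--         if bank not in open_rows:
--             open_rows[bank] = -1
--             activations[bank] = 0
--
--         if open_rows[bank] != row:
--             activations[bank] += 1
--             open_rows[bank] = row
--
--     return activations
-- ===== SOURCE B (Python) =====
-- def count_row_activations(trace, dram_config):
--     """
--     Count row activations from a trace, in two passes:
--     first group the decoded row indices per bank (in first-encounter
--     bank order), then count row transitions per bank.
--     """
--     rows_by_bank = {}  # bank -> list of decoded rows, in trace order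
--     for line in trace:
--         parts = line.strip().split()
--         if len(parts) < 2:
--             continue
--         try:
--             addr = int(parts[1], 16)
--         except ValueError:
--             continue
--         bank = (addr >> 10) & 0b11
--         row = addr >> 12
--         rows_by_bank.setdefault(bank, []).append(row)
--
--     activations = {}
--     for bank, rows in rows_by_bank.items():
--         count = 0
--         prev = -1
--         for r in rows:
--             if r != prev:
--                 count += 1
--                 prev = r
--         activations[bank] = count
--     return activations
-- ===== Notes on version B (the rewrite author's own statement) =====
-- stated objective: alternative
-- what changed: Replaces A's single fused streaming loop maintaining two parallel dicts (open row + count per bank) with a two-pass decomposition: first group decoded row indices per bank into lists, then count row transitions per bank with a separate fold.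
import Mathlib
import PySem

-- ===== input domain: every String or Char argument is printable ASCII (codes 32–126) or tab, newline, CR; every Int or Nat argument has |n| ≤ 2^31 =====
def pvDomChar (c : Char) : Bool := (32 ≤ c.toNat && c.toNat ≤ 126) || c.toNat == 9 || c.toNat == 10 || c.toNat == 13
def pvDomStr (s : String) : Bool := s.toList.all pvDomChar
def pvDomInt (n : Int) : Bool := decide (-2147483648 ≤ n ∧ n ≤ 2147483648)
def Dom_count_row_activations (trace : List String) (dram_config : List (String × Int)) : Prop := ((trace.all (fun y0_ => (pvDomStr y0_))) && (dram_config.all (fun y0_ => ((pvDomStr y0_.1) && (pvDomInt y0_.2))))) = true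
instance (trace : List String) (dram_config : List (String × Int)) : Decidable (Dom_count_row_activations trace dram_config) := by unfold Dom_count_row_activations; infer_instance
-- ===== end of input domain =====

-- B replaces A's fused streaming counter by a group-then-count two-pass decomposition; return values proved equal.

-- ===== PORT A =====
def count_row_activations (trace : List String) (dram_config : List (String × Int)) : List (Int × Int) :=
  let st := trace.foldl
    (fun (st : PySem.Dict Int Int × PySem.Dict Int Int) line =>
      let activations := st.1
      let open_rows := st.2
      let parts := PySem.Str.split₀ (PySem.Str.strip line)
      if parts.length < 2 then st else
      match PySem.Int.ofStrBase? (parts.getD 1 "") 16 with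
      | none => st
      | some addr =>
        let bank := PySem.Int.band (addr >>> 10) ((1 <<< 2) - 1)
        let row := addr >>> (10 + 2)
        let (activations, open_rows) :=
          if open_rows.contains bank then (activations, open_rows)
          else (activations.insert bank 0, open_rows.insert bank (-1))
        if open_rows.getD bank 0 ≠ row then
          (activations.modify bank 0 (· + 1), open_rows.insert bank row)
        else (activations, open_rows))
    (PySem.Dict.empty, PySem.Dict.empty)
  st.1.items

-- ===== PORT B =====
def count_row_activations_alt (trace : List String) (dram_config : List (String × Int)) : List (Int × Int) :=
  let rows_by_bank := trace.foldl
    (fun (d : PySem.Dict Int (List Int)) line =>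
      let parts := PySem.Str.split₀ (PySem.Str.strip line)
      if parts.length < 2 then d else
      match PySem.Int.ofStrBase? (parts.getD 1 "") 16 with
      | none => d
      | some addr =>
        let bank := PySem.Int.band (addr >>> 10) 3
        let row := addr >>> 12
        d.modify bank [] (· ++ [row]))
    PySem.Dict.empty
  rows_by_bank.items.map (fun p =>
    (p.1, (p.2.foldl (fun (acc : Int × Int) r =>
            if r ≠ acc.2 then (acc.1 + 1, r) else acc) (0, -1)).1))

-- ===== PRECONDITION & SPEC =====
def Spec_count_row_activations (trace : List String) (dram_config : List (String × Int)) (out : List (Int × Int)) : Prop := out = count_row_activations_alt trace dram_config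
instance (trace : List String) (dram_config : List (String × Int)) (out : List (Int × Int)) : Decidable (Spec_count_row_activations trace dram_config out) := by unfold Spec_count_row_activations; infer_instance

-- ===== CLAIM (what is proved, stated in full; the proofs are below) =====
def Claim_equal_count_row_activations : Prop := ∀ (trace : List String) (dram_config : List (String × Int)), Dom_count_row_activations trace dram_config → Spec_count_row_activations trace dram_config (count_row_activations trace dram_config)

-- ===== LEMMAS AND PROOFS =====

-- B's inner transition-counting step and its fold
def pvStep (acc : Int × Int) (r : Int) : Int × Int :=
  if r ≠ acc.2 then (acc.1 + 1, r) else acc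

def pvG (rs : List Int) : Int × Int := rs.foldl pvStep (0, -1)

def pvF1 (p : Int × List Int) : Int × Int := (p.1, (pvG p.2).1)
def pvF2 (p : Int × List Int) : Int × Int := (p.1, (pvG p.2).2)

-- the loop bodies of the two ports, named for the induction
def pvBodyA (st : PySem.Dict Int Int × PySem.Dict Int Int) (line : String) :
    PySem.Dict Int Int × PySem.Dict Int Int :=
  let activations := st.1
  let open_rows := st.2
  let parts := PySem.Str.split₀ (PySem.Str.strip line)
  if parts.length < 2 then st else
  match PySem.Int.ofStrBase? (parts.getD 1 "") 16 with
  | none => st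
  | some addr =>
    let bank := PySem.Int.band (addr >>> 10) ((1 <<< 2) - 1)
    let row := addr >>> (10 + 2)
    let (activations, open_rows) :=
      if open_rows.contains bank then (activations, open_rows)
      else (activations.insert bank 0, open_rows.insert bank (-1))
    if open_rows.getD bank 0 ≠ row then
      (activations.modify bank 0 (· + 1), open_rows.insert bank row)
    else (activations, open_rows)

def pvBodyB (d : PySem.Dict Int (List Int)) (line : String) : PySem.Dict Int (List Int) :=
  let parts := PySem.Str.split₀ (PySem.Str.strip line)
  if parts.length < 2 then d else
  match PySem.Int.ofStrBase? (parts.getD 1 "") 16 with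
  | none => d
  | some addr =>
    let bank := PySem.Int.band (addr >>> 10) 3
    let row := addr >>> 12
    d.modify bank [] (· ++ [row])

-- A's per-event step, isolated from the parsing
def pvStepA (st : PySem.Dict Int Int × PySem.Dict Int Int) (bank row : Int) :
    PySem.Dict Int Int × PySem.Dict Int Int :=
  let activations := st.1
  let open_rows := st.2
  let (activations, open_rows) :=
    if open_rows.contains bank then (activations, open_rows)
    else (activations.insert bank 0, open_rows.insert bank (-1))
  if open_rows.getD bank 0 ≠ row then
    (activations.modify bank 0 (· + 1), open_rows.insert bank row)
  else (activations, open_rows)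

-- the coupling invariant between A's two dicts and B's grouping dict
def pvInv (d : PySem.Dict Int (List Int)) (a o : PySem.Dict Int Int) : Prop :=
  a.items = d.items.map pvF1 ∧ o.items = d.items.map pvF2 ∧ d.keys.Nodup

lemma pvG_append (rs : List Int) (r : Int) : pvG (rs ++ [r]) = pvStep (pvG rs) r := by
  simp [pvG]

lemma pv_keys_a {d : PySem.Dict Int (List Int)} {a o : PySem.Dict Int Int}
    (h : pvInv d a o) : a.keys = d.keys := by
  simp only [PySem.Dict.keys, h.1, List.map_map]
  exact List.map_congr_left (fun p _ => rfl)

lemma pv_keys_o {d : PySem.Dict Int (List Int)} {a o : PySem.Dict Int Int}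
    (h : pvInv d a o) : o.keys = d.keys := by
  simp only [PySem.Dict.keys, h.2.1, List.map_map]
  exact List.map_congr_left (fun p _ => rfl)

lemma pv_uniq {d : PySem.Dict Int (List Int)} (hnd : d.keys.Nodup)
    {b : Int} {rs : List Int} (hm : (b, rs) ∈ d.items)
    {q : Int × List Int} (hq : q ∈ d.items) (hqb : q.1 = b) : q = (b, rs) := by
  obtain ⟨q1, q2⟩ := q
  simp only at hqb; subst hqb
  have h1 : d.get? q1 = some rs := (PySem.Dict.get?_eq_some_iff_mem_items d q1 rs hnd).2 hm
  have h2 : d.get? q1 = some q2 := (PySem.Dict.get?_eq_some_iff_mem_items d q1 q2 hnd).2 hq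
  rw [h1] at h2
  simp_all

lemma pv_step {d : PySem.Dict Int (List Int)} {a o : PySem.Dict Int Int} (b r : Int)
    (h : pvInv d a o) :
    pvInv (d.modify b [] (· ++ [r])) (pvStepA (a, o) b r).1 (pvStepA (a, o) b r).2 := by
  obtain ⟨ha, ho, hnd⟩ := h
  have hka := pv_keys_a ⟨ha, ho, hnd⟩
  have hko := pv_keys_o ⟨ha, ho, hnd⟩
  have hmod : d.modify b [] (· ++ [r]) = d.insert b (d.getD b [] ++ [r]) := rfl
  by_cases hc : d.contains b = true
  · -- bank already seen: there is a unique entry (b, rs)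
    obtain ⟨q, hmemq, hqb⟩ :=
      List.exists_of_mem_map (by
        simpa only [PySem.Dict.keys] using (PySem.Dict.contains_iff_mem_keys d b).1 hc)
    obtain ⟨b', rs⟩ := q
    simp only at hqb
    have hmem : (b, rs) ∈ d.items := hqb ▸ hmemq
    have hgd : d.getD b [] = rs := PySem.Dict.getD_of_mem_items d hmem hnd []
    have hoc : o.contains b = true := by
      rw [PySem.Dict.contains_iff_mem_keys, hko]
      exact (PySem.Dict.contains_iff_mem_keys d b).1 hc
    have hac : a.contains b = true := by
      rw [PySem.Dict.contains_iff_mem_keys, hka]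
      exact (PySem.Dict.contains_iff_mem_keys d b).1 hc
    have hand : a.keys.Nodup := hka ▸ hnd
    have hond : o.keys.Nodup := hko ▸ hnd
    have hga : a.getD b 0 = (pvG rs).1 :=
      PySem.Dict.getD_of_mem_items a (by rw [ha]; exact List.mem_map_of_mem hmem) hand 0
    have hgo : o.getD b 0 = (pvG rs).2 :=
      PySem.Dict.getD_of_mem_items o (by rw [ho]; exact List.mem_map_of_mem hmem) hond 0
    have hdit : (d.modify b [] (· ++ [r])).items =
        d.items.map (fun p => if (p.1 == b) = true then (b, rs ++ [r]) else p) := by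
      rw [hmod, hgd]; exact PySem.Dict.items_insert_of_contains d _ hc
    have hdk : (d.modify b [] (· ++ [r])).keys.Nodup := by
      rw [hmod]; exact PySem.Dict.nodup_keys_insert d b _ hnd
    have hamod : a.modify b 0 (· + 1) = a.insert b ((pvG rs).1 + 1) := by
      show a.insert b (a.getD b 0 + 1) = _
      rw [hga]
    by_cases hr : (pvG rs).2 ≠ r
    · -- row changes: A bumps the counter and re-opens; B appends r
      have hstep : pvStep (pvG rs) r = ((pvG rs).1 + 1, r) := by
        simp [pvStep, Ne.symm hr]
      have hres : pvStepA (a, o) b r = (a.insert b ((pvG rs).1 + 1), o.insert b r) := by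
        unfold pvStepA
        simp only [hoc, if_true, hgo]
        rw [if_pos hr, hamod]
      rw [hres]
      refine ⟨?_, ?_, hdk⟩
      · rw [PySem.Dict.items_insert_of_contains a _ hac, ha, hdit,
          List.map_map, List.map_map]
        refine List.map_congr_left (fun q hq => ?_)
        by_cases hqb : q.1 = b
        · have := pv_uniq hnd hmem hq hqb
          subst this
          simp [pvF1, Function.comp, pvG_append, hstep]
        · simp [pvF1, Function.comp, hqb]
      · rw [PySem.Dict.items_insert_of_contains o _ hoc, ho, hdit,
          List.map_map, List.map_map]
        refine List.map_congr_left (fun q hq => ?_)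
        by_cases hqb : q.1 = b
        · have := pv_uniq hnd hmem hq hqb
          subst this
          simp [pvF2, Function.comp, pvG_append, hstep]
        · simp [pvF2, Function.comp, hqb]
    · -- same row: A does nothing; B appends r but the fold ignores it
      rw [not_ne_iff] at hr
      have hstep : pvStep (pvG rs) r = pvG rs := by
        simp [pvStep, hr]
      have hres : pvStepA (a, o) b r = (a, o) := by
        unfold pvStepA
        simp only [hoc, if_true, hgo]
        rw [if_neg (by simp [hr])]
      rw [hres]
      refine ⟨?_, ?_, hdk⟩
      · rw [ha, hdit, List.map_map]
        refine List.map_congr_left (fun q hq => ?_)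
        by_cases hqb : q.1 = b
        · have := pv_uniq hnd hmem hq hqb
          subst this
          simp [pvF1, Function.comp, pvG_append, hstep]
        · simp [pvF1, Function.comp, hqb]
      · rw [ho, hdit, List.map_map]
        refine List.map_congr_left (fun q hq => ?_)
        by_cases hqb : q.1 = b
        · have := pv_uniq hnd hmem hq hqb
          subst this
          simp [pvF2, Function.comp, pvG_append, hstep]
        · simp [pvF2, Function.comp, hqb]
  · -- fresh bank
    have hc' : d.contains b = false := by simpa using hc
    have hbk : b ∉ d.keys := fun hmem => hc ((PySem.Dict.contains_iff_mem_keys d b).2 hmem)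
    have hoc : o.contains b = false := by
      refine Bool.eq_false_iff.2 (fun hct => hbk ?_)
      rw [← hko]; exact (PySem.Dict.contains_iff_mem_keys o b).1 hct
    have hac : a.contains b = false := by
      refine Bool.eq_false_iff.2 (fun hct => hbk ?_)
      rw [← hka]; exact (PySem.Dict.contains_iff_mem_keys a b).1 hct
    have hgd : d.getD b [] = [] := PySem.Dict.getD_of_not_contains d [] hc'
    have hdit : (d.modify b [] (· ++ [r])).items = d.items ++ [(b, [r])] := by
      rw [hmod, hgd]; exact PySem.Dict.items_insert_of_not_contains d [r] hc'
    have hdk : (d.modify b [] (· ++ [r])).keys.Nodup := by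
      rw [hmod]; exact PySem.Dict.nodup_keys_insert d b _ hnd
    have hgo1 : (o.insert b (-1)).getD b 0 = -1 := PySem.Dict.getD_insert_self o b (-1) 0
    by_cases hr : r = -1
    · -- first access already "matches" the closed row sentinel -1: count stays 0
      subst hr
      have hres : pvStepA (a, o) b (-1) = (a.insert b 0, o.insert b (-1)) := by
        unfold pvStepA
        simp only [hoc, Bool.false_eq_true, if_false]
        rw [if_neg (by simp [hgo1])]
      rw [hres]
      refine ⟨?_, ?_, hdk⟩
      · rw [PySem.Dict.items_insert_of_not_contains a 0 hac, ha, hdit, List.map_append]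
        rfl
      · rw [PySem.Dict.items_insert_of_not_contains o (-1) hoc, ho, hdit, List.map_append]
        rfl
    · have hamod : (a.insert b 0).modify b 0 (· + 1) = a.insert b 1 := by
        show (a.insert b 0).insert b ((a.insert b 0).getD b 0 + 1) = _
        rw [PySem.Dict.getD_insert_self, PySem.Dict.insert_insert_self]
        norm_num
      have hres : pvStepA (a, o) b r = (a.insert b 1, o.insert b r) := by
        unfold pvStepA
        simp only [hoc, Bool.false_eq_true, if_false]
        rw [if_pos (by simp [hgo1, Ne.symm hr]), hamod, PySem.Dict.insert_insert_self]
      rw [hres]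
      have hg1 : pvG [r] = (1, r) := by simp [pvG, pvStep, hr]
      refine ⟨?_, ?_, hdk⟩
      · rw [PySem.Dict.items_insert_of_not_contains a 1 hac, ha, hdit, List.map_append]
        simp [pvF1, hg1]
      · rw [PySem.Dict.items_insert_of_not_contains o r hoc, ho, hdit, List.map_append]
        simp [pvF2, hg1]

lemma pvA_len (st : PySem.Dict Int Int × PySem.Dict Int Int) (line : String)
    (h : (PySem.Str.split₀ (PySem.Str.strip line)).length < 2) : pvBodyA st line = st := by
  unfold pvBodyA; rw [if_pos h]

lemma pvB_len (d : PySem.Dict Int (List Int)) (line : String)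
    (h : (PySem.Str.split₀ (PySem.Str.strip line)).length < 2) : pvBodyB d line = d := by
  unfold pvBodyB; rw [if_pos h]

lemma pvA_none (st : PySem.Dict Int Int × PySem.Dict Int Int) (line : String)
    (hlen : ¬ (PySem.Str.split₀ (PySem.Str.strip line)).length < 2)
    (hp : PySem.Int.ofStrBase? ((PySem.Str.split₀ (PySem.Str.strip line)).getD 1 "") 16 = none) :
    pvBodyA st line = st := by
  unfold pvBodyA; rw [if_neg hlen, hp]

lemma pvB_none (d : PySem.Dict Int (List Int)) (line : String)
    (hlen : ¬ (PySem.Str.split₀ (PySem.Str.strip line)).length < 2)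
    (hp : PySem.Int.ofStrBase? ((PySem.Str.split₀ (PySem.Str.strip line)).getD 1 "") 16 = none) :
    pvBodyB d line = d := by
  unfold pvBodyB; rw [if_neg hlen, hp]

lemma pvA_some (st : PySem.Dict Int Int × PySem.Dict Int Int) (line : String) (addr : Int)
    (hlen : ¬ (PySem.Str.split₀ (PySem.Str.strip line)).length < 2)
    (hp : PySem.Int.ofStrBase? ((PySem.Str.split₀ (PySem.Str.strip line)).getD 1 "") 16 = some addr) :
    pvBodyA st line = pvStepA st (PySem.Int.band (addr >>> 10) 3) (addr >>> 12) := by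
  unfold pvBodyA; rw [if_neg hlen, hp]; rfl

lemma pvB_some (d : PySem.Dict Int (List Int)) (line : String) (addr : Int)
    (hlen : ¬ (PySem.Str.split₀ (PySem.Str.strip line)).length < 2)
    (hp : PySem.Int.ofStrBase? ((PySem.Str.split₀ (PySem.Str.strip line)).getD 1 "") 16 = some addr) :
    pvBodyB d line = d.modify (PySem.Int.band (addr >>> 10) 3) [] (· ++ [addr >>> 12]) := by
  unfold pvBodyB; rw [if_neg hlen, hp]

lemma pv_fold (trace : List String) :
    ∀ (d : PySem.Dict Int (List Int)) (a o : PySem.Dict Int Int), pvInv d a o →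
    pvInv (trace.foldl pvBodyB d) (trace.foldl pvBodyA (a, o)).1 (trace.foldl pvBodyA (a, o)).2 := by
  induction trace with
  | nil => intro d a o h; exact h
  | cons line rest ih =>
    intro d a o h
    rw [List.foldl_cons, List.foldl_cons]
    by_cases hlen : (PySem.Str.split₀ (PySem.Str.strip line)).length < 2
    · rw [pvA_len _ _ hlen, pvB_len _ _ hlen]; exact ih d a o h
    · cases hp : PySem.Int.ofStrBase? ((PySem.Str.split₀ (PySem.Str.strip line)).getD 1 "") 16 with
      | none =>
        rw [pvA_none _ _ hlen hp, pvB_none _ _ hlen hp]; exact ih d a o h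
      | some addr =>
        rw [pvA_some _ _ _ hlen hp, pvB_some _ _ _ hlen hp]
        exact ih _ _ _ (pv_step _ _ h)

lemma pv_portA (trace : List String) (dram_config : List (String × Int)) :
    count_row_activations trace dram_config =
      (trace.foldl pvBodyA (PySem.Dict.empty, PySem.Dict.empty)).1.items := rfl

lemma pv_portB (trace : List String) (dram_config : List (String × Int)) :
    count_row_activations_alt trace dram_config =
      (trace.foldl pvBodyB PySem.Dict.empty).items.map pvF1 := rfl

-- ===== VERDICT (by name: the statement is the Claim_ definition above) =====
theorem count_row_activations_spec : Claim_equal_count_row_activations := by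
  intro trace dram_config _
  show count_row_activations trace dram_config = count_row_activations_alt trace dram_config
  rw [pv_portA, pv_portB]
  have hinv : pvInv PySem.Dict.empty PySem.Dict.empty PySem.Dict.empty := by
    unfold pvInv; refine ⟨rfl, rfl, by simp⟩
  have hfold := pv_fold trace PySem.Dict.empty PySem.Dict.empty PySem.Dict.empty hinv
  unfold pvInv at hfold
  exact hfold.1
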